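-- pv_equiv track=rewrite | github.com/SzymonRymszewicz/Project_Nova | Code/pipeline.py | _normalize_prompt_order
-- ===== SOURCE A (Python) =====
-- def _normalize_prompt_order(order):
--     defaults = ["conduct", "scenario", "core", "user_persona", "iam"]
--     if not isinstance(order, list):
--         return defaults
--
--     normalized = []
--     for item in order:
--         if item in defaults and item not in normalized:
--             normalized.append(item)
--
--     for item in defaults:
--         if item not in normalized:
--             normalized.append(item)
--
--     return normalized
-- ===== SOURCE B (Python) =====
-- def _normalize_prompt_order(order):
--     defaults = ["conduct", "scenario", "core", "user_persona", "iam"]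
--     if not isinstance(order, list):
--         return defaults
--     n = len(order)
--
--     def key(d):
--         # defaults present in order sort by their first-occurrence index;
--         # absent defaults sort after all of them, in default order
--         return order.index(d) if d in order else n + defaults.index(d)
--
--     return sorted(defaults, key=key)
-- ===== Notes on version B (the rewrite author's own statement) =====
-- stated objective: alternative
-- what changed: Replaces the two filtering passes (with a quadratic 'not in normalized' scan) by a single stable sort of the fixed defaults list keyed by first-occurrence index in order, with absent defaults keyed past the end in default order.
import Mathlib
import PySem

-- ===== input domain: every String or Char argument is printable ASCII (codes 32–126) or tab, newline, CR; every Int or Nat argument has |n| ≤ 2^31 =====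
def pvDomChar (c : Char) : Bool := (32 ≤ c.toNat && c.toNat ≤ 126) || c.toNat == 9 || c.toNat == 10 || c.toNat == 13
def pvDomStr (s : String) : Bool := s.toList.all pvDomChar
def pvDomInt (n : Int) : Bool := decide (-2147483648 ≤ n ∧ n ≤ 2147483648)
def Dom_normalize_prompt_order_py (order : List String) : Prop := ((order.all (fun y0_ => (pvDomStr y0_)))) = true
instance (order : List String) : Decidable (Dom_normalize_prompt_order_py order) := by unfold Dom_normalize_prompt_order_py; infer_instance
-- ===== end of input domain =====

-- B replaces A's two filtering passes by one stable sort of the fixed defaults list,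
-- keyed by first-occurrence index in `order` (absent defaults keyed past the end, in default order).


-- the fixed `defaults` list both Pythons start from
def pvDefaults : List String := ["conduct", "scenario", "core", "user_persona", "iam"]

-- ===== PORT A =====
-- In Lean `order : List String` is always a list, so the `isinstance` guard's else-branch is the whole port.
def normalize_prompt_order_py (order : List String) : List String :=
  let defaults := pvDefaults
  let normalized :=
    order.foldl (fun acc item =>
      if item ∈ defaults ∧ item ∉ acc then acc ++ [item] else acc) []
  defaults.foldl (fun acc item =>
    if item ∉ acc then acc ++ [item] else acc) normalized

-- ===== PORT B =====
-- B's key(d): order.index(d) if d in order else n + defaults.index(d).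
-- `defaults.index(d)` is only evaluated for d ∈ defaults (never raises); `.getD 0` renders that total.
def pvKey (order : List String) (d : String) : Int :=
  match PySem.List.index? order d with
  | some i => (i : Int)
  | none => (order.length : Int) + (((PySem.List.index? pvDefaults d).getD 0 : Nat) : Int)

def normalize_prompt_order_py_alt (order : List String) : List String :=
  PySem.List.sorted pvDefaults (pvKey order) false

-- ===== PRECONDITION & SPEC =====
def Spec_normalize_prompt_order_py (order : List String) (out : List String) : Prop := out = normalize_prompt_order_py_alt order
instance (order : List String) (out : List String) : Decidable (Spec_normalize_prompt_order_py order out) := by unfold Spec_normalize_prompt_order_py; infer_instance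

-- ===== CLAIM (what is proved, stated in full; the proofs are below) =====
def Claim_equal_normalize_prompt_order_py : Prop := ∀ (order : List String), Dom_normalize_prompt_order_py order → Spec_normalize_prompt_order_py order (normalize_prompt_order_py order)

-- ===== LEMMAS AND PROOFS =====

-- the deduplicated defaults-members of `order`, in first-occurrence order
def pvF (order : List String) : List String :=
  (PySem.Set.ofList order).filter (fun x => decide (x ∈ pvDefaults))

-- the defaults missing from pvF, in default order
def pvM (order : List String) : List String :=
  pvDefaults.filter (fun x => decide (x ∉ pvF order))

lemma mem_pvF (order : List String) (a : String) :
    a ∈ pvF order ↔ a ∈ order ∧ a ∈ pvDefaults := by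
  simp [pvF, List.mem_filter, PySem.Set.mem_ofList]

-- ofList commutes with filter
lemma ofList_filter (q : String → Bool) (xs : List String) :
    PySem.Set.ofList (xs.filter q) = (PySem.Set.ofList xs).filter q := by
  induction xs with
  | nil => rfl
  | cons x xs ih =>
    by_cases hq : q x
    · rw [List.filter_cons_of_pos hq, PySem.Set.ofList_cons, PySem.Set.ofList_cons,
        List.filter_cons_of_pos hq, ih]
      simp only [PySem.Set.discard, List.filter_filter]
      congr 1
      apply List.filter_congr
      intro a _
      simp [Bool.and_comm]
    · rw [List.filter_cons_of_neg hq, PySem.Set.ofList_cons,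
        List.filter_cons_of_neg hq, ih]
      simp only [PySem.Set.discard, List.filter_filter]
      apply List.filter_congr
      intro a _
      by_cases hax : a = x
      · subst hax; simp [hq]
      · simp [hax]

-- A's first loop computes pvF
lemma loop1_eq (order : List String) :
    order.foldl (fun acc item =>
      if item ∈ pvDefaults ∧ item ∉ acc then acc ++ [item] else acc) [] = pvF order := by
  have hstep : (fun (acc : List String) (item : String) =>
      if item ∈ pvDefaults ∧ item ∉ acc then acc ++ [item] else acc)
      = (fun acc item => if item ∈ pvDefaults then PySem.Set.add acc item else acc) := by
    funext acc item
    by_cases h1 : item ∈ pvDefaults <;> by_cases h2 : item ∈ acc <;>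
      simp [PySem.Set.add, h1, h2]
  rw [hstep, PySem.List.foldl_ite_eq_foldl_filter (p := fun item => item ∈ pvDefaults)
      (f := PySem.Set.add), ← PySem.Set.ofList_eq_foldl, pvF, ofList_filter]

-- A's second loop is Set.update, which appends the missing elements
lemma update_eq (dl : List String) (hdl : dl.Nodup) (s : List String) :
    PySem.Set.update s dl = s ++ dl.filter (fun x => decide (x ∉ s)) := by
  induction dl generalizing s with
  | nil => simp [PySem.Set.update]
  | cons x dl ih =>
    have hx_dl : x ∉ dl := (List.nodup_cons.1 hdl).1
    have hdl' : dl.Nodup := (List.nodup_cons.1 hdl).2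
    show PySem.Set.update (PySem.Set.add s x) dl = _
    by_cases hx : x ∈ s
    · have hadd : PySem.Set.add s x = s := by simp [PySem.Set.add, hx]
      rw [hadd, ih hdl']
      simp [hx]
    · have hadd : PySem.Set.add s x = s ++ [x] := by simp [PySem.Set.add, hx]
      rw [hadd, ih hdl']
      have hfil : dl.filter (fun y => decide (y ∉ s ++ [x]))
          = dl.filter (fun y => decide (y ∉ s)) := by
        apply List.filter_congr
        intro a ha
        have hax : a ≠ x := fun h => hx_dl (h ▸ ha)
        simp [hax]
      rw [hfil, List.filter_cons]
      simp [hx, List.append_assoc]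

lemma loop2_eq (s : List String) :
    pvDefaults.foldl (fun acc item =>
      if item ∉ acc then acc ++ [item] else acc) s
      = s ++ pvDefaults.filter (fun x => decide (x ∉ s)) := by
  have hstep : (fun (acc : List String) (item : String) =>
      if item ∉ acc then acc ++ [item] else acc)
      = PySem.Set.add := by
    funext acc item
    by_cases h : item ∈ acc <;> simp [PySem.Set.add, h]
  rw [hstep]
  have : pvDefaults.foldl PySem.Set.add s = PySem.Set.update s pvDefaults := rfl
  rw [this, update_eq pvDefaults (by decide) s]

lemma A_eq (order : List String) :
    normalize_prompt_order_py order = pvF order ++ pvM order := by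
  simp only [normalize_prompt_order_py]
  rw [loop1_eq, loop2_eq]
  rfl

-- first-occurrence index, defaulting past the end
def pvIdx (xs : List String) (a : String) : Nat :=
  (PySem.List.index? xs a).getD xs.length

lemma idx_cons_of_ne_of_mem (x a : String) (xs : List String) (hne : a ≠ x) (ha : a ∈ xs) :
    pvIdx (x :: xs) a = pvIdx xs a + 1 := by
  obtain ⟨j, hj⟩ := Option.isSome_iff_exists.1 ((PySem.List.index?_isSome_iff xs a).2 ha)
  rw [pvIdx, pvIdx, PySem.List.index?_cons_of_ne xs (Ne.symm hne), hj]
  rfl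

lemma ofList_pairwise_idx (xs : List String) :
    (PySem.Set.ofList xs).Pairwise (fun a b => pvIdx xs a < pvIdx xs b) := by
  induction xs with
  | nil => simp [PySem.Set.ofList]
  | cons x xs ih =>
    rw [PySem.Set.ofList_cons, List.pairwise_cons]
    constructor
    · intro b hb
      obtain ⟨hbmem, hbne⟩ := (PySem.Set.mem_discard _ _ _).1 hb
      have hbxs : b ∈ xs := (PySem.Set.mem_ofList xs b).1 hbmem
      rw [idx_cons_of_ne_of_mem x b xs hbne hbxs]
      have : pvIdx (x :: xs) x = 0 := by
        rw [pvIdx, PySem.List.index?_cons_self]; rfl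
      omega
    · have hp : ((PySem.Set.ofList xs).discard x).Pairwise
          (fun a b => pvIdx xs a < pvIdx xs b) := ih.filter _
      refine hp.imp_of_mem ?_
      intro a b ha hb hab
      obtain ⟨hamem, hane⟩ := (PySem.Set.mem_discard _ _ _).1 ha
      obtain ⟨hbmem, hbne⟩ := (PySem.Set.mem_discard _ _ _).1 hb
      rw [idx_cons_of_ne_of_mem x a xs hane ((PySem.Set.mem_ofList xs a).1 hamem),
        idx_cons_of_ne_of_mem x b xs hbne ((PySem.Set.mem_ofList xs b).1 hbmem)]
      omega

lemma pvKey_of_mem (order : List String) (a : String) (ha : a ∈ order) :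
    ∃ i : Nat, PySem.List.index? order a = some i ∧ i < order.length ∧
      pvKey order a = (i : Int) ∧ pvIdx order a = i := by
  obtain ⟨i, hi⟩ := Option.isSome_iff_exists.1 ((PySem.List.index?_isSome_iff order a).2 ha)
  obtain ⟨hk, -, -⟩ := PySem.List.getElem_of_index?_eq_some hi
  refine ⟨i, hi, hk, ?_, ?_⟩
  · unfold pvKey; rw [hi]
  · unfold pvIdx; rw [hi]; rfl

lemma pvKey_of_not_mem (order : List String) (a : String) (ha : a ∉ order) :
    pvKey order a = (order.length : Int) + (((PySem.List.index? pvDefaults a).getD 0 : Nat) : Int) := by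
  unfold pvKey; rw [(PySem.List.index?_eq_none_iff order a).2 ha]

lemma not_mem_order_of_mem_pvM (order : List String) (a : String) (ha : a ∈ pvM order) :
    a ∉ order ∧ a ∈ pvDefaults := by
  obtain ⟨hadl, hanf⟩ := List.mem_filter.1 ha
  have hanf' : a ∉ pvF order := by simpa using hanf
  exact ⟨fun hmem => hanf' ((mem_pvF order a).2 ⟨hmem, hadl⟩), hadl⟩

lemma B_eq (order : List String) :
    normalize_prompt_order_py_alt order = pvF order ++ pvM order := by
  have hFsub : ∀ a ∈ pvF order, a ∈ order ∧ a ∈ pvDefaults :=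
    fun a ha => (mem_pvF order a).1 ha
  have hnodupF : (pvF order).Nodup := (PySem.Set.nodup_ofList order).filter _
  have hdlnodup : pvDefaults.Nodup := by decide
  have hnodupM : (pvM order).Nodup := hdlnodup.filter _
  have hdisj : (pvF order).Disjoint (pvM order) := by
    intro a haF haM
    obtain ⟨-, hanf⟩ := List.mem_filter.1 haM
    have : a ∉ pvF order := by simpa using hanf
    exact this haF
  have hperm : (pvF order ++ pvM order).Perm pvDefaults := by
    rw [List.perm_ext_iff_of_nodup (List.Nodup.append hnodupF hnodupM hdisj) (by decide)]
    intro a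
    constructor
    · intro h
      rcases List.mem_append.1 h with h | h
      · exact (hFsub a h).2
      · exact (List.mem_filter.1 h).1
    · intro h
      by_cases hF : a ∈ pvF order
      · exact List.mem_append.2 (Or.inl hF)
      · exact List.mem_append.2 (Or.inr (List.mem_filter.2 ⟨h, by simpa using hF⟩))
  have hpair : (pvF order ++ pvM order).Pairwise
      (fun a b => pvKey order a < pvKey order b) := by
    rw [List.pairwise_append]
    refine ⟨?_, ?_, ?_⟩
    · have hp : (pvF order).Pairwise (fun a b => pvIdx order a < pvIdx order b) :=
        (ofList_pairwise_idx order).filter _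
      refine hp.imp_of_mem ?_
      intro a b ha hb hab
      obtain ⟨ia, -, -, hka, hia⟩ := pvKey_of_mem order a (hFsub a ha).1
      obtain ⟨ib, -, -, hkb, hib⟩ := pvKey_of_mem order b (hFsub b hb).1
      rw [hka, hkb]
      omega
    · have hbase : pvDefaults.Pairwise (fun a b =>
          ((PySem.List.index? pvDefaults a).getD 0) < ((PySem.List.index? pvDefaults b).getD 0)) := by
        decide
      have hp : (pvM order).Pairwise (fun a b =>
          ((PySem.List.index? pvDefaults a).getD 0) < ((PySem.List.index? pvDefaults b).getD 0)) :=
        hbase.filter _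
      refine hp.imp_of_mem ?_
      intro a b ha hb hab
      rw [pvKey_of_not_mem order a (not_mem_order_of_mem_pvM order a ha).1,
        pvKey_of_not_mem order b (not_mem_order_of_mem_pvM order b hb).1]
      omega
    · intro a ha b hb
      obtain ⟨ia, -, hlt, hka, -⟩ := pvKey_of_mem order a (hFsub a ha).1
      rw [hka, pvKey_of_not_mem order b (not_mem_order_of_mem_pvM order b hb).1]
      omega
  exact PySem.List.sorted_eq_of_perm_of_pairwise_lt pvDefaults (pvF order ++ pvM order)
    (pvKey order) hperm hpair

-- ===== VERDICT (by name: the statement is the Claim_ definition above) =====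
theorem normalize_prompt_order_py_spec : Claim_equal_normalize_prompt_order_py := by
  intro order _
  unfold Spec_normalize_prompt_order_py
  rw [A_eq, B_eq]
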